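-- pv_equiv track=rewrite | github.com/MarcSerraPeralta/ssd-scheduler | brute force creation of 6th color.py | is_edge_valid
-- ===== SOURCE A (Python) =====
-- def is_edge_valid(edge, color, edge_color_map):
--     node1, node2 = edge
--     for other_edge, other_color in edge_color_map.items():
--         if other_color == color:
--             other_node1, other_node2 = other_edge
--             if node1 in (other_node1, other_node2) or node2 in (other_node1, other_node2):
--                 return False
--     return True
-- ===== SOURCE B (Python) =====
-- def is_edge_valid(edge, color, edge_color_map):
--     # Build an inverted index: node -> set of all colors appearing on edges at that node.
--     node_colors = {}
--     for (n1, n2), c in edge_color_map.items():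
--         node_colors.setdefault(n1, set()).add(c)
--         node_colors.setdefault(n2, set()).add(c)
--     a, b = edge
--     return color not in node_colors.get(a, set()) and color not in node_colors.get(b, set())
-- ===== Notes on version B (the rewrite author's own statement) =====
-- stated objective: alternative
-- what changed: B builds an inverted index mapping each node to the set of ALL colors incident on it (no color filtering during the pass), then decides validity by two dictionary lookups testing whether `color` is among the colors at either endpoint; A instead scans the map for same-colored edges and tests endpoint overlap per edge with an early return.
import Mathlib
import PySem

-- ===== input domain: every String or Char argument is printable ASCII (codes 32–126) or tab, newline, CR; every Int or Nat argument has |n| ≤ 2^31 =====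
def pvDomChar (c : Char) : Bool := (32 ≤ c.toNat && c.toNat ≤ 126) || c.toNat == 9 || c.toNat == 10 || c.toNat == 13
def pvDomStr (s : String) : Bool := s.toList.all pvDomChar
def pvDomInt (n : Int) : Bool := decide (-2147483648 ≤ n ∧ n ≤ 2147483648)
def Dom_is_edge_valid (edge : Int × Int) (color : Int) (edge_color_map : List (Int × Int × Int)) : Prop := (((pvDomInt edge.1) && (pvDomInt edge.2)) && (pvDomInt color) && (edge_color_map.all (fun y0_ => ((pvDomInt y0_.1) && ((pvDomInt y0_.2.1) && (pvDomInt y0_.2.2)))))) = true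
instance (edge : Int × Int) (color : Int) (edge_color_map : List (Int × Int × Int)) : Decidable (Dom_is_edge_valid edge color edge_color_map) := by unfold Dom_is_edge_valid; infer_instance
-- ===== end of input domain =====

-- B replaces A's filtered scan for same-colored clashing edges by an inverted index node -> set of all incident colors, answered by two lookups (alternative decomposition, same O(n) cost).
-- ===== PORT A =====
-- A: scan the dict; return False as soon as a same-colored edge shares a node.
def is_edge_valid (edge : Int × Int) (color : Int) (edge_color_map : List (Int × Int × Int)) : Bool :=
  match edge_color_map with
  | [] => true
  | (a, b, oc) :: rest =>
    if oc == color then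
      if edge.1 == a || edge.1 == b || edge.2 == a || edge.2 == b then false
      else is_edge_valid edge color rest
    else is_edge_valid edge color rest

-- ===== PORT B =====
-- B: build node_colors : node -> set of all colors on edges at that node
-- (setdefault(n, set()).add(c) is Dict.modify n empty (·.add c)), then two lookups.
def is_edge_valid_alt (edge : Int × Int) (color : Int) (edge_color_map : List (Int × Int × Int)) : Bool :=
  let node_colors : PySem.Dict Int (PySem.Set Int) :=
    edge_color_map.foldl
      (fun d e =>
        (d.modify e.1 PySem.Set.empty (fun s => s.add e.2.2)).modify e.2.1 PySem.Set.empty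
          (fun s => s.add e.2.2))
      PySem.Dict.empty
  !((node_colors.getD edge.1 PySem.Set.empty).contains color) &&
    !((node_colors.getD edge.2 PySem.Set.empty).contains color)

-- ===== PRECONDITION & SPEC =====
def Spec_is_edge_valid (edge : Int × Int) (color : Int) (edge_color_map : List (Int × Int × Int)) (out : Bool) : Prop := out = is_edge_valid_alt edge color edge_color_map
instance (edge : Int × Int) (color : Int) (edge_color_map : List (Int × Int × Int)) (out : Bool) : Decidable (Spec_is_edge_valid edge color edge_color_map out) := by unfold Spec_is_edge_valid; infer_instance

-- ===== CLAIM =====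
def Claim_equal_is_edge_valid : Prop := ∀ (edge : Int × Int) (color : Int) (edge_color_map : List (Int × Int × Int)), Dom_is_edge_valid edge color edge_color_map → Spec_is_edge_valid edge color edge_color_map (is_edge_valid edge color edge_color_map)

-- ===== LEMMAS AND PROOFS =====

lemma contains_getD_modify (d : PySem.Dict Int (PySem.Set Int)) (k x n c : Int) :
    (((d.modify k PySem.Set.empty (fun s => s.add x)).getD n PySem.Set.empty).contains c)
      = ((n == k && c == x) || (d.getD n PySem.Set.empty).contains c) := by
  rw [PySem.Dict.getD_modify]
  by_cases h : n = k <;> by_cases hx : c = x <;>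
    simp [h, hx, PySem.Set.mem_add]

-- the color set accumulated at node n by B's index-building loop
lemma contains_build (c : Int) (m : List (Int × Int × Int))
    (d : PySem.Dict Int (PySem.Set Int)) (n : Int) :
    ((m.foldl
        (fun d e =>
          (d.modify e.1 PySem.Set.empty (fun s => s.add e.2.2)).modify e.2.1 PySem.Set.empty
            (fun s => s.add e.2.2))
        d).getD n PySem.Set.empty).contains c
      = ((d.getD n PySem.Set.empty).contains c
          || m.any (fun e => e.2.2 == c && (n == e.1 || n == e.2.1))) := by
  induction m generalizing d with
  | nil => simp
  | cons hd tl ih =>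
    obtain ⟨a, b, oc⟩ := hd
    simp only [List.foldl_cons, List.any_cons, ih, contains_getD_modify]
    by_cases h1 : n = a <;> by_cases h2 : n = b <;> by_cases hc : oc = c <;>
      first
        | (have e1 : (oc == c) = false := beq_eq_false_iff_ne.mpr hc
           have e2 : (c == oc) = false := beq_eq_false_iff_ne.mpr (Ne.symm hc)
           simp [h1, h2, e1, e2, Bool.or_comm])
        | simp [h1, h2, hc, Bool.or_assoc, Bool.or_comm, Bool.or_left_comm]

-- A's early-return scan equals a pair of any-scans
lemma scan_eq_any (edge : Int × Int) (color : Int) (m : List (Int × Int × Int)) :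
    is_edge_valid edge color m
      = ((!m.any fun e => e.2.2 == color && (edge.1 == e.1 || edge.1 == e.2.1)) &&
         !m.any fun e => e.2.2 == color && (edge.2 == e.1 || edge.2 == e.2.1)) := by
  induction m with
  | nil => simp [is_edge_valid]
  | cons hd tl ih =>
    obtain ⟨a, b, oc⟩ := hd
    simp only [is_edge_valid, List.any_cons]
    by_cases hc : oc == color
    · by_cases hn : (edge.1 == a || edge.1 == b || edge.2 == a || edge.2 == b) = true
      · rw [if_pos hn]
        cases hA : (edge.1 == a) <;> cases hB : (edge.1 == b) <;>
          cases hC : (edge.2 == a) <;> cases hD : (edge.2 == b) <;> simp_all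
      · simp only [Bool.or_eq_true, beq_iff_eq, not_or] at hn
        obtain ⟨⟨⟨h1a, h1b⟩, h2a⟩, h2b⟩ := hn
        have e1 : (edge.1 == a) = false := beq_eq_false_iff_ne.mpr h1a
        have e2 : (edge.1 == b) = false := beq_eq_false_iff_ne.mpr h1b
        have e3 : (edge.2 == a) = false := beq_eq_false_iff_ne.mpr h2a
        have e4 : (edge.2 == b) = false := beq_eq_false_iff_ne.mpr h2b
        simp [ih, e1, e2, e3, e4]
    · simp [hc, ih]

-- ===== VERDICT =====
theorem is_edge_valid_spec : Claim_equal_is_edge_valid := by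
  intro edge color m _
  unfold Spec_is_edge_valid is_edge_valid_alt
  simp only [contains_build, scan_eq_any, PySem.Dict.getD_empty]
  simp [PySem.Set.contains]
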